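-- pv_equiv track=rewrite | github.com/anantham/live_conversational_threads | lct_python_backend/services/turn_synthesizer.py | _create_node_label
-- ===== SOURCE A (Python) =====
-- def _create_node_label(speaker_name: str, text: str, max_length: int = 60) -> str:
--     """Create a concise, meaningful label for a graph node."""
--     cleaned_text = text.strip()
--
--     sentence_endings = [". ", "? ", "! ", ".\n", "?\n", "!\n"]
--     first_sentence_end = len(cleaned_text)
--     for ending in sentence_endings:
--         pos = cleaned_text.find(ending)
--         if pos != -1 and pos < first_sentence_end:
--             first_sentence_end = pos + 1
--
--     if first_sentence_end < max_length:
--         summary = cleaned_text[:first_sentence_end].strip()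
--     elif len(cleaned_text) > max_length:
--         summary = cleaned_text[:max_length].rsplit(" ", 1)[0] + "..."
--     else:
--         summary = cleaned_text
--
--     speaker_parts = speaker_name.split()
--     if len(speaker_parts) >= 2:
--         initials = "".join([part[0].upper() for part in speaker_parts[:2]])
--     else:
--         initials = speaker_name[:2].upper()
--
--     return f"[{initials}] {summary}"
-- ===== SOURCE B (Python) =====
-- def _create_node_label(speaker_name: str, text: str, max_length: int = 60) -> str:
--     """Create a concise, meaningful label for a graph node."""
--     cleaned = text.strip()
--     n = len(cleaned)
--
--     # single left-to-right scan for the first sentence boundary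
--     end = n
--     for i in range(n - 1):
--         if cleaned[i] in ".?!" and cleaned[i + 1] in " \n":
--             end = i + 1
--             break
--
--     if end < max_length:
--         summary = cleaned[:end].strip()
--     elif n > max_length:
--         cut = cleaned[:max_length]
--         sp = cut.rfind(" ")
--         summary = (cut if sp == -1 else cut[:sp]) + "..."
--     else:
--         summary = cleaned
--
--     parts = speaker_name.split()
--     if len(parts) >= 2:
--         initials = (parts[0][0] + parts[1][0]).upper()
--     else:
--         initials = speaker_name[:2].upper()
--
--     return "[" + initials + "] " + summary
-- ===== Notes on version B (the rewrite author's own statement) =====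
-- stated objective: alternative
-- what changed: The first sentence boundary is found by one left-to-right character scan with early exit instead of six separate str.find passes minimized over, the truncation branch uses rfind on the cut prefix instead of rsplit building a list, and the initials are built from the two leading characters directly instead of a join over a mapped slice.
import Mathlib
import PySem

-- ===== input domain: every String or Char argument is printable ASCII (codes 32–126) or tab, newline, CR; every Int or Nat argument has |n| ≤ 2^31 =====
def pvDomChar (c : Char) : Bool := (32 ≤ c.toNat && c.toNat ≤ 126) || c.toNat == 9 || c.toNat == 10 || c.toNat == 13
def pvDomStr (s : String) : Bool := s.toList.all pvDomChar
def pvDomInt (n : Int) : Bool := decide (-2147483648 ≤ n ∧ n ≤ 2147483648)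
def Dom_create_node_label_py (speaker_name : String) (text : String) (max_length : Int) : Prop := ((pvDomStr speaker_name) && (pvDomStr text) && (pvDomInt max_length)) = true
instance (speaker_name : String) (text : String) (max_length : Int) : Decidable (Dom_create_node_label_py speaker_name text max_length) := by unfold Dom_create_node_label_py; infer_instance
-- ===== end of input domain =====

-- B replaces A's six-find minimization by a single left-to-right scan, the rsplit list by an rfind cut,
-- and the join-over-mapped-slice initials by direct access to the two leading characters (objective: alternative).

-- ===== PORT A =====
-- hand port of cs.rsplit(" ", 1): exact for the single-character separator — split at its last occurrence
def pyRsplitSpace1 (cs : List Char) : List (List Char) :=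
  let i := PySem.Chars.rfind cs [' ']
  if i = -1 then [cs]
  else [PySem.List.slice cs none (some i), PySem.List.slice cs (some (i + 1)) none]

def create_node_label_py (speaker_name : String) (text : String) (max_length : Int) : String :=
  let cleaned := PySem.Chars.strip text.toList
  let endings : List (List Char) := [['.', ' '], ['?', ' '], ['!', ' '], ['.', '\n'], ['?', '\n'], ['!', '\n']]
  let fse : Int := endings.foldl (fun acc e =>
      let pos := PySem.Chars.find cleaned e
      if pos ≠ -1 ∧ pos < acc then pos + 1 else acc) ((cleaned.length : Int))
  let summary : List Char :=
    if fse < max_length then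
      PySem.Chars.strip (PySem.List.slice cleaned none (some fse))
    else if (cleaned.length : Int) > max_length then
      (match pyRsplitSpace1 (PySem.List.slice cleaned none (some max_length)) with
       | x :: _ => x
       | [] => []) ++ ['.', '.', '.']   -- [0]: rsplit always returns a nonempty list, so indexing cannot raise
    else cleaned
  let speaker_parts := PySem.Chars.split₀ speaker_name.toList
  let initials : List Char :=
    if speaker_parts.length ≥ 2 then
      PySem.Chars.join [] ((PySem.List.slice speaker_parts none (some 2)).map (fun part =>
        match part with
        | c :: _ => PySem.Chars.upper [c]   -- part[0].upper(): split() pieces are nonempty, so part[0] cannot raise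
        | [] => []))
    else
      PySem.Chars.upper (PySem.List.slice speaker_name.toList none (some 2))
  String.ofList (['['] ++ initials ++ [']', ' '] ++ summary)

-- ===== PORT B =====
-- port of Source B's `for i in range(n-1): if cleaned[i] in ".?!" and cleaned[i+1] in " \n": end = i+1; break`
-- (the single-character `in ".?!"` membership is the written-out disjunction)
def altScanB (s : List Char) (i : Nat) : Nat :=
  if h : i + 1 < s.length then
    if (s[i]'(Nat.lt_of_succ_lt h) = '.' ∨ s[i]'(Nat.lt_of_succ_lt h) = '?' ∨ s[i]'(Nat.lt_of_succ_lt h) = '!') ∧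
       (s[i + 1]'h = ' ' ∨ s[i + 1]'h = '\n') then
      i + 1
    else
      altScanB s (i + 1)
  else
    s.length
termination_by s.length - i
decreasing_by omega

def create_node_label_py_alt (speaker_name : String) (text : String) (max_length : Int) : String :=
  let cleaned := PySem.Chars.strip text.toList
  let n := cleaned.length
  let e := altScanB cleaned 0
  let summary : List Char :=
    if (e : Int) < max_length then
      PySem.Chars.strip (cleaned.take e)
    else if (n : Int) > max_length then
      let cut := PySem.List.slice cleaned none (some max_length)
      let sp := PySem.Chars.rfind cut [' ']
      (if sp = -1 then cut else PySem.List.slice cut none (some sp)) ++ ['.', '.', '.']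
    else cleaned
  let parts := PySem.Chars.split₀ speaker_name.toList
  let initials : List Char :=
    if parts.length ≥ 2 then
      match parts with
      | (c0 :: _) :: (c1 :: _) :: _ => PySem.Chars.upper [c0, c1]
      | _ => []   -- unreachable: split() pieces are nonempty and there are at least two of them
    else
      PySem.Chars.upper (PySem.List.slice speaker_name.toList none (some 2))
  String.ofList (['['] ++ initials ++ [']', ' '] ++ summary)

-- ===== PRECONDITION & SPEC =====
def Spec_create_node_label_py (speaker_name : String) (text : String) (max_length : Int) (out : String) : Prop := out = create_node_label_py_alt speaker_name text max_length
instance (speaker_name : String) (text : String) (max_length : Int) (out : String) : Decidable (Spec_create_node_label_py speaker_name text max_length out) := by unfold Spec_create_node_label_py; infer_instance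

-- ===== CLAIM (what is proved, stated in full; the proofs are below) =====
def Claim_equal_create_node_label_py : Prop := ∀ (speaker_name : String) (text : String) (max_length : Int), Dom_create_node_label_py speaker_name text max_length → Spec_create_node_label_py speaker_name text max_length (create_node_label_py speaker_name text max_length)

-- ===== LEMMAS AND PROOFS =====

-- `sentAt s i`: position i of s carries a sentence boundary (punctuation followed by space/newline)
def sentAt (s : List Char) (i : Nat) : Bool :=
  (s[i]? == some '.' || s[i]? == some '?' || s[i]? == some '!') &&
  (s[i + 1]? == some ' ' || s[i + 1]? == some '\n')

theorem prefix_pair_drop_iff (s : List Char) (c d : Char) (i : Nat) :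
    [c, d] <+: s.drop i ↔ (s[i]? = some c ∧ s[i + 1]? = some d) := by
  constructor
  · rintro ⟨t, ht⟩
    have h0 : (s.drop i)[0]? = some c := by rw [← ht]; rfl
    have h1 : (s.drop i)[1]? = some d := by rw [← ht]; rfl
    rw [List.getElem?_drop] at h0 h1
    simpa using And.intro h0 h1
  · rintro ⟨h0, h1⟩
    have hi1 : i + 1 < s.length := (List.getElem?_eq_some_iff.mp h1).1
    have hi : i < s.length := by omega
    refine ⟨s.drop (i + 2), ?_⟩
    rw [List.drop_eq_getElem_cons hi, List.drop_eq_getElem_cons (by omega : i + 1 < s.length)]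
    have e0 : s[i]'hi = c := by simpa [List.getElem?_eq_getElem hi] using h0
    have e1 : s[i + 1]'hi1 = d := by simpa [List.getElem?_eq_getElem hi1] using h1
    simp [e0, e1]

theorem sentAt_of_prefix (s : List Char) (c d : Char) (j : Nat)
    (hc : c = '.' ∨ c = '?' ∨ c = '!') (hd : d = ' ' ∨ d = '\n')
    (h : [c, d] <+: s.drop j) : sentAt s j = true := by
  rcases (prefix_pair_drop_iff s c d j).mp h with ⟨h0, h1⟩
  unfold sentAt
  rcases hc with rfl | rfl | rfl <;> rcases hd with rfl | rfl <;> simp [h0, h1]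

theorem sentAt_lt (s : List Char) (j : Nat) (hj : sentAt s j = true) : j + 1 < s.length := by
  unfold sentAt at hj
  simp only [Bool.and_eq_true, Bool.or_eq_true, beq_iff_eq] at hj
  rcases hj.2 with h | h <;> exact (List.getElem?_eq_some_iff.mp h).1

theorem find_eq_neg_one_of_none (s : List Char) (c d : Char)
    (hc : c = '.' ∨ c = '?' ∨ c = '!') (hd : d = ' ' ∨ d = '\n')
    (hn : ∀ j, sentAt s j ≠ true) : PySem.Chars.find s [c, d] = -1 := by
  rw [PySem.Chars.find_eq_neg_one_iff]
  intro hinf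
  have hin : PySem.Chars.isIn [c, d] s = true := (PySem.Chars.isIn_iff_infix _ _).mpr hinf
  rcases (PySem.Chars.exists_prefix_drop_iff_isIn _ _).mpr hin with ⟨j, hj⟩
  exact hn j (sentAt_of_prefix s c d j hc hd hj)

-- value contributed by one ending in the minimized fold
def gval (s e : List Char) : Int :=
  if PySem.Chars.find s e = -1 then (s.length : Int) else PySem.Chars.find s e + 1

theorem find_bounds (s e : List Char) (h : PySem.Chars.find s e ≠ -1) :
    0 ≤ PySem.Chars.find s e ∧ PySem.Chars.find s e + (e.length : Int) ≤ (s.length : Int) := by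
  have h0 : 0 ≤ PySem.Chars.find s e := by
    have := PySem.Chars.neg_one_le_find s e
    omega
  have hspec := (PySem.Chars.find_spec h0).1
  have hlen : e.length ≤ (s.drop (PySem.Chars.find s e).toNat).length := hspec.length_le
  have hle := PySem.Chars.find_le_length s e
  rw [List.length_drop] at hlen
  constructor
  · exact h0
  · omega

theorem step_eq_min (s e : List Char) (a : Int) (he : e.length = 2) (ha : a ≤ (s.length : Int)) :
    (let pos := PySem.Chars.find s e;
     if pos ≠ -1 ∧ pos < a then pos + 1 else a) = min a (gval s e) := by
  unfold gval
  by_cases hp : PySem.Chars.find s e = -1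
  · simp [hp]; omega
  · have hb := find_bounds s e hp
    rw [he] at hb
    simp only [hp, if_false]
    obtain ⟨hb0, hb1⟩ := hb
    split_ifs with h
    · have hlt : PySem.Chars.find s e < a := h.2
      omega
    · have hlt : ¬ PySem.Chars.find s e < a := by
        intro hcon
        exact h ⟨hp, hcon⟩
      omega

theorem fold_eq_foldmin (s : List Char) :
    ∀ (es : List (List Char)), (∀ e ∈ es, e.length = 2) → ∀ a : Int, a ≤ (s.length : Int) →
    es.foldl (fun acc e =>
      let pos := PySem.Chars.find s e
      if pos ≠ -1 ∧ pos < acc then pos + 1 else acc) a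
    = es.foldl (fun acc e => min acc (gval s e)) a := by
  intro es
  induction es with
  | nil => intro _ a _; rfl
  | cons e es ih =>
    intro hlen a ha
    simp only [List.foldl_cons]
    rw [step_eq_min s e a (hlen e (by simp)) ha]
    refine ih (fun e' he' => hlen e' (by simp [he'])) _ ?_
    have hg : gval s e ≤ (s.length : Int) := by
      unfold gval
      by_cases hp : PySem.Chars.find s e = -1
      · simp [hp]
      · have hb := find_bounds s e hp
        rw [hlen e (by simp)] at hb
        simp only [hp, if_false]
        omega
    omega

theorem altScanB_of_none (s : List Char) (hn : ∀ j, sentAt s j ≠ true) :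
    ∀ i, altScanB s i = s.length := by
  intro i
  induction i using altScanB.induct s with
  | case1 x h hcond =>
    exfalso
    apply hn x
    unfold sentAt
    simp only [List.getElem?_eq_getElem (Nat.lt_of_succ_lt h), List.getElem?_eq_getElem h,
      Bool.and_eq_true, Bool.or_eq_true, beq_iff_eq, Option.some_inj]
    tauto
  | case2 x h hcond ih =>
    rw [altScanB]
    rw [dif_pos h, if_neg hcond]
    exact ih
  | case3 x h =>
    rw [altScanB]
    rw [dif_neg h]

theorem altScanB_of_least (s : List Char) (j : Nat) (hj : sentAt s j = true)
    (hmin : ∀ k, k < j → sentAt s k ≠ true) :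
    ∀ i, i ≤ j → altScanB s i = j + 1 := by
  intro i
  induction i using altScanB.induct s with
  | case1 x h hcond =>
    intro hle
    have hx : sentAt s x = true := by
      unfold sentAt
      simp only [List.getElem?_eq_getElem (Nat.lt_of_succ_lt h), List.getElem?_eq_getElem h,
        Bool.and_eq_true, Bool.or_eq_true, beq_iff_eq, Option.some_inj]
      tauto
    have hxj : x = j := by
      by_contra hne
      exact hmin x (by omega) hx
    rw [altScanB, dif_pos h, if_pos hcond, hxj]
  | case2 x h hcond ih =>
    intro hle
    have hxj : x ≠ j := by
      intro hxe
      apply hcond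
      subst hxe
      unfold sentAt at hj
      simp only [List.getElem?_eq_getElem (Nat.lt_of_succ_lt h), List.getElem?_eq_getElem h,
        Bool.and_eq_true, Bool.or_eq_true, beq_iff_eq, Option.some_inj] at hj
      tauto
    rw [altScanB, dif_pos h, if_neg hcond]
    exact ih (by omega)
  | case3 x h =>
    intro hle
    exfalso
    have := sentAt_lt s j hj
    omega

theorem find_eq_of_least (s : List Char) (c d : Char) (j : Nat)
    (hc : c = '.' ∨ c = '?' ∨ c = '!') (hd : d = ' ' ∨ d = '\n')
    (hpre : [c, d] <+: s.drop j) (hmin : ∀ k, k < j → sentAt s k ≠ true) :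
    PySem.Chars.find s [c, d] = (j : Int) := by
  have hne : PySem.Chars.find s [c, d] ≠ -1 := by
    rw [Ne, PySem.Chars.find_eq_neg_one_iff]
    intro hni
    exact hni ((PySem.Chars.isIn_iff_infix _ _).mp
      ((PySem.Chars.exists_prefix_drop_iff_isIn _ _).mp ⟨j, hpre⟩))
  have h0 : 0 ≤ PySem.Chars.find s [c, d] := by
    have := PySem.Chars.neg_one_le_find s [c, d]
    omega
  have hspec := PySem.Chars.find_spec h0
  have hple : (PySem.Chars.find s [c, d]).toNat ≤ j := by
    by_contra hgt
    exact hspec.2 j (by omega) hpre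
  have hpge : j ≤ (PySem.Chars.find s [c, d]).toNat := by
    by_contra hlt
    exact hmin _ (by omega) (sentAt_of_prefix s c d _ hc hd hspec.1)
  omega

theorem gval_of_find_eq (s e : List Char) (j : Nat)
    (h : PySem.Chars.find s e = (j : Int)) : gval s e = (j : Int) + 1 := by
  unfold gval
  rw [h, if_neg (by omega : ¬ ((j : Int) = -1))]

theorem fse_eq (s : List Char) :
    ([['.', ' '], ['?', ' '], ['!', ' '], ['.', '\n'], ['?', '\n'], ['!', '\n']] : List (List Char)).foldl
      (fun acc e =>
        let pos := PySem.Chars.find s e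
        if pos ≠ -1 ∧ pos < acc then pos + 1 else acc) ((s.length : Int))
    = ((altScanB s 0 : Nat) : Int) := by
  have hlens : ∀ e ∈ ([['.', ' '], ['?', ' '], ['!', ' '], ['.', '\n'], ['?', '\n'], ['!', '\n']] : List (List Char)), e.length = 2 := by
    intro e he
    simp only [List.mem_cons, List.not_mem_nil, or_false] at he
    rcases he with rfl | rfl | rfl | rfl | rfl | rfl <;> rfl
  rw [fold_eq_foldmin s _ hlens _ le_rfl]
  by_cases hex : ∃ jj, sentAt s jj = true
  · have hj := Nat.find_spec hex
    have hmin : ∀ k, k < Nat.find hex → sentAt s k ≠ true := fun k hk => Nat.find_min hex hk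
    set j := Nat.find hex with hjdef
    rw [altScanB_of_least s j hj hmin 0 (Nat.zero_le j)]
    have hjl : j + 1 < s.length := sentAt_lt s j hj
    have hge : ∀ c d : Char, (c = '.' ∨ c = '?' ∨ c = '!') → (d = ' ' ∨ d = '\n') →
        ((j : Int) + 1 ≤ gval s [c, d]) := by
      intro c d hc hd
      unfold gval
      by_cases hp : PySem.Chars.find s [c, d] = -1
      · rw [if_pos hp]
        omega
      · have h0 : 0 ≤ PySem.Chars.find s [c, d] := by
          have := PySem.Chars.neg_one_le_find s [c, d]
          omega
        have hspec := PySem.Chars.find_spec h0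
        have hsent : sentAt s (PySem.Chars.find s [c, d]).toNat = true :=
          sentAt_of_prefix s c d _ hc hd hspec.1
        have : j ≤ (PySem.Chars.find s [c, d]).toNat := by
          by_contra hlt
          exact hmin _ (by omega) hsent
        simp only [hp, if_false]
        omega
    have hj' := hj
    unfold sentAt at hj'
    simp only [Bool.and_eq_true, Bool.or_eq_true, beq_iff_eq] at hj'
    obtain ⟨hcj, hdj⟩ := hj'
    have hg1 := hge '.' ' ' (by left; rfl) (by left; rfl)
    have hg2 := hge '?' ' ' (by right; left; rfl) (by left; rfl)
    have hg3 := hge '!' ' ' (by right; right; rfl) (by left; rfl)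
    have hg4 := hge '.' '\n' (by left; rfl) (by right; rfl)
    have hg5 := hge '?' '\n' (by right; left; rfl) (by right; rfl)
    have hg6 := hge '!' '\n' (by right; right; rfl) (by right; rfl)
    simp only [List.foldl_cons, List.foldl_nil]
    rcases hcj with (hcj | hcj) | hcj <;> rcases hdj with hdj | hdj <;>
    · have hpre := (prefix_pair_drop_iff s _ _ j).mpr ⟨hcj, hdj⟩
      have hfj := find_eq_of_least s _ _ j (by simp) (by simp) hpre hmin
      have hgv := gval_of_find_eq s _ j hfj
      push_cast
      omega
  · have hn : ∀ jj, sentAt s jj ≠ true := by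
      intro jj hjj
      exact hex ⟨jj, hjj⟩
    rw [altScanB_of_none s hn 0]
    have h1 := find_eq_neg_one_of_none s '.' ' ' (by left; rfl) (by left; rfl) hn
    have h2 := find_eq_neg_one_of_none s '?' ' ' (by right; left; rfl) (by left; rfl) hn
    have h3 := find_eq_neg_one_of_none s '!' ' ' (by right; right; rfl) (by left; rfl) hn
    have h4 := find_eq_neg_one_of_none s '.' '\n' (by left; rfl) (by right; rfl) hn
    have h5 := find_eq_neg_one_of_none s '?' '\n' (by right; left; rfl) (by right; rfl) hn
    have h6 := find_eq_neg_one_of_none s '!' '\n' (by right; right; rfl) (by right; rfl) hn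
    simp [List.foldl, gval, h1, h2, h3, h4, h5, h6]

theorem split₀_go_ne_nil :
    ∀ (s cur : List Char) (acc : List (List Char)), (∀ p ∈ acc, p ≠ []) →
      ∀ p ∈ PySem.Chars.split₀.go s cur acc, p ≠ [] := by
  intro s
  induction s with
  | nil =>
    intro cur acc hacc p hp
    unfold PySem.Chars.split₀.go at hp
    split at hp
    · exact hacc p (List.mem_reverse.mp hp)
    · rw [List.mem_reverse, List.mem_cons] at hp
      rcases hp with rfl | hp
      · simp only [ne_eq, List.reverse_eq_nil_iff]
        intro hcur
        simp [hcur] at *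
      · exact hacc p hp
  | cons c rest ih =>
    intro cur acc hacc p hp
    unfold PySem.Chars.split₀.go at hp
    split at hp
    · split at hp
      · exact ih [] acc hacc p hp
      · refine ih [] (cur.reverse :: acc) ?_ p hp
        intro q hq
        rcases List.mem_cons.mp hq with rfl | hq
        · simp only [ne_eq, List.reverse_eq_nil_iff]
          intro hcur
          simp [hcur] at *
        · exact hacc q hq
    · exact ih (c :: cur) acc hacc p hp

theorem split₀_ne_nil (cs : List Char) : ∀ p ∈ PySem.Chars.split₀ cs, p ≠ [] :=
  split₀_go_ne_nil cs [] [] (by intro p hp; simp at hp)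

theorem rsplit_head_eq (cs : List Char) :
    (match pyRsplitSpace1 cs with | x :: _ => x | [] => []) =
    (if PySem.Chars.rfind cs [' '] = -1 then cs
     else PySem.List.slice cs none (some (PySem.Chars.rfind cs [' ']))) := by
  by_cases h : PySem.Chars.rfind cs [' '] = -1 <;> simp [pyRsplitSpace1, h]

theorem initials_A_eq (c0 c1 : Char) (t0 t1 : List Char) (rest : List (List Char)) :
    PySem.Chars.join [] ((PySem.List.slice ((c0 :: t0) :: (c1 :: t1) :: rest) none (some 2)).map (fun part =>
      match part with
      | c :: _ => PySem.Chars.upper [c]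
      | [] => []))
    = PySem.Chars.upper [c0, c1] := by
  rw [PySem.List.slice_to _ (by norm_num)]
  norm_num
  simp [PySem.Chars.join, List.intercalate, PySem.Chars.upper]

theorem AB_eq (speaker_name text : String) (max_length : Int) :
    create_node_label_py speaker_name text max_length
      = create_node_label_py_alt speaker_name text max_length := by
  unfold create_node_label_py create_node_label_py_alt
  simp only [fse_eq, rsplit_head_eq, PySem.List.slice_to_natCast]
  have hS := split₀_ne_nil speaker_name.toList
  congr 1
  generalize hps : PySem.Chars.split₀ speaker_name.toList = ps at hS ⊢
  by_cases hl : ps.length ≥ 2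
  · rw [if_pos hl, if_pos hl]
    rcases ps with _ | ⟨_ | ⟨c0, t0⟩, ps2⟩
    · simp at hl
    · exact absurd rfl (hS [] (by simp))
    · rcases ps2 with _ | ⟨_ | ⟨c1, t1⟩, rest⟩
      · simp at hl
      · exact absurd rfl (hS [] (by simp))
      · rw [initials_A_eq]
  · rw [if_neg hl, if_neg hl]

-- ===== VERDICT (by name: the statement is the Claim_ definition above) =====
theorem create_node_label_py_spec : Claim_equal_create_node_label_py := by
  intro speaker_name text max_length _
  unfold Spec_create_node_label_py
  exact AB_eq speaker_name text max_length
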